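-- pv_equiv track=rewrite | github.com/bossman48/python-test | solution_header.py | makeConfidentialString
-- ===== SOURCE A (Python) =====
-- def makeConfidentialString(string):
--     result=""
--     for character in string:
--         if(ord(character)>=48 and ord(character)<=57):
--             result+="X"
--         elif(ord(character)>=65 and ord(character)<=90):
--             result+="X"
--         elif(ord(character)>=97 and ord(character)<=122):
--             result+="X"
--         else:
--             result+=character
--     return result
-- ===== SOURCE B (Python) =====
-- def _isAsciiAlnum(c):
--     return '0' <= c <= '9' or 'A' <= c <= 'Z' or 'a' <= c <= 'z'
--
-- def makeConfidentialString(string):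
--     n = len(string)
--     pieces = []
--     i = 0
--     while i < n:
--         if _isAsciiAlnum(string[i]):
--             j = i
--             while j < n and _isAsciiAlnum(string[j]):
--                 j += 1
--             pieces.append("X" * (j - i))
--             i = j
--         else:
--             pieces.append(string[i])
--             i += 1
--     return "".join(pieces)
-- ===== Notes on version B (the rewrite author's own statement) =====
-- stated objective: alternative
-- what changed: Instead of a per-character branching loop with string +=, B scans the string in maximal runs of ASCII alphanumerics, emits one "X"*(run length) chunk per run (and single non-alnum characters verbatim) into a list, and joins the chunks once at the end.
import Mathlib
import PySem

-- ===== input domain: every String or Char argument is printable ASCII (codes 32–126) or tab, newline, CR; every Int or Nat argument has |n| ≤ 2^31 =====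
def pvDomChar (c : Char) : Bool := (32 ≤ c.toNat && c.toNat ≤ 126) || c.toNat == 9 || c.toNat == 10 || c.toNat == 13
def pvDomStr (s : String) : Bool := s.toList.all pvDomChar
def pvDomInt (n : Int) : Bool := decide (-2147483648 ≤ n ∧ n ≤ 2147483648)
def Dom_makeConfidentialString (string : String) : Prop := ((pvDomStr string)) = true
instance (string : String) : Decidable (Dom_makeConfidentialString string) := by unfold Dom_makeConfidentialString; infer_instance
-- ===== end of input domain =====

-- B replaces A's per-character branching loop with string += by a run-based scan:
-- maximal ASCII-alphanumeric runs become one "X"*(run length) chunk each, chunks are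
-- joined once at the end (alternative decomposition, not claimed faster).

-- ===== PORT A =====
-- result accumulated as List Char (Python's result += c), String.ofList at the end
def makeConfidentialString (string : String) : String :=
  String.ofList (string.toList.foldl (fun result character =>
    result ++ [if 48 ≤ character.toNat ∧ character.toNat ≤ 57 then 'X'
               else if 65 ≤ character.toNat ∧ character.toNat ≤ 90 then 'X'
               else if 97 ≤ character.toNat ∧ character.toNat ≤ 122 then 'X'
               else character]) [])

-- ===== PORT B =====
-- _isAsciiAlnum(c): chained char comparisons, as in Source B
def pvIsAlnum (c : Char) : Bool :=
  ('0' ≤ c && c ≤ '9') || ('A' ≤ c && c ≤ 'Z') || ('a' ≤ c && c ≤ 'z')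

-- inner while: advance j while j < n and _isAsciiAlnum(string[j])
def pvRun (cs : List Char) (n j : Nat) : Nat :=
  if j < n ∧ pvIsAlnum (cs.getD j ' ') = true then pvRun cs n (j + 1) else j
termination_by n - j
decreasing_by omega

-- j ≤ pvRun cs n j (needed to show the outer loop's index strictly advances)
theorem pvRun_ge (cs : List Char) (n j : Nat) : j ≤ pvRun cs n j := by
  unfold pvRun
  split
  · have := pvRun_ge cs n (j + 1); omega
  · exact Nat.le_refl j
termination_by n - j
decreasing_by omega

theorem pvRun_gt (cs : List Char) (n i : Nat)
    (h1 : i < n) (h2 : pvIsAlnum (cs.getD i ' ') = true) : i < pvRun cs n i := by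
  rw [pvRun]
  simp only [h1, h2, and_self, if_pos, true_and]
  have := pvRun_ge cs n (i + 1)
  omega

-- outer while over i, collecting chunks into pieces
def pvLoop (cs : List Char) (n i : Nat) (pieces : List String) : List String :=
  if h : i < n then
    if ha : pvIsAlnum (cs.getD i ' ') = true then
      pvLoop cs n (pvRun cs n i)
        (pieces ++ [String.ofList (List.replicate (pvRun cs n i - i) 'X')])
    else
      pvLoop cs n (i + 1) (pieces ++ [String.ofList [cs.getD i ' ']])
  else pieces
termination_by n - i
decreasing_by
  · have := pvRun_gt cs n i h ha; omega
  · omega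

def makeConfidentialString_alt (string : String) : String :=
  PySem.Str.join "" (pvLoop string.toList string.toList.length 0 [])

-- ===== PRECONDITION & SPEC =====
def Spec_makeConfidentialString (string : String) (out : String) : Prop := out = makeConfidentialString_alt string
instance (string : String) (out : String) : Decidable (Spec_makeConfidentialString string out) := by unfold Spec_makeConfidentialString; infer_instance

-- ===== CLAIM (what is proved, stated in full; the proofs are below) =====
def Claim_equal_makeConfidentialString : Prop := ∀ (string : String), Dom_makeConfidentialString string → Spec_makeConfidentialString string (makeConfidentialString string)

-- ===== LEMMAS AND PROOFS =====

-- A's per-character replacement as a named function (the port's lambda, definitionally)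
def pvF (character : Char) : Char :=
  if 48 ≤ character.toNat ∧ character.toNat ≤ 57 then 'X'
  else if 65 ≤ character.toNat ∧ character.toNat ≤ 90 then 'X'
  else if 97 ≤ character.toNat ∧ character.toNat ≤ 122 then 'X'
  else character

theorem pvF_eq (c : Char) : pvF c = if pvIsAlnum c then 'X' else c := by
  have h0 : c.toNat = c.val.toNat := rfl
  simp only [pvF, pvIsAlnum, Char.le_def, UInt32.le_iff_toNat_le, Bool.or_eq_true,
    Bool.and_eq_true, decide_eq_true_eq]
  split_ifs <;> simp_all <;> omega

theorem pvJoin_nil_flatten (ps : List (List Char)) :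
    PySem.Chars.join [] ps = ps.flatten := by
  induction ps with
  | nil => simp [PySem.Chars.join_nil]
  | cons p rest ih =>
    cases rest with
    | nil => simp [PySem.Chars.join_singleton]
    | cons q r =>
      simp only [PySem.Chars.join_cons_cons] at *
      simp [ih]

-- the inner while covers exactly a maximal alnum run: its Xs plus the mapped tail
theorem pvRun_spec (cs : List Char) (j : Nat) :
    List.replicate (pvRun cs cs.length j - j) 'X'
      ++ (cs.drop (pvRun cs cs.length j)).map pvF
    = (cs.drop j).map pvF := by
  rw [pvRun]
  split
  · rename_i h
    obtain ⟨hlt, ha⟩ := h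
    have hge := pvRun_ge cs cs.length (j + 1)
    have hdrop : cs.drop j = cs[j] :: cs.drop (j + 1) :=
      List.drop_eq_getElem_cons hlt
    have hget : cs.getD j ' ' = cs[j] := List.getD_eq_getElem cs ' ' hlt
    have hrep : List.replicate (pvRun cs cs.length (j + 1) - j) 'X'
        = 'X' :: List.replicate (pvRun cs cs.length (j + 1) - (j + 1)) 'X' := by
      have : pvRun cs cs.length (j + 1) - j
          = (pvRun cs cs.length (j + 1) - (j + 1)) + 1 := by omega
      rw [this, List.replicate_succ]
    rw [hrep, hdrop]
    simp only [List.map_cons, List.cons_append]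
    have hx : pvF cs[j] = 'X' := by
      rw [pvF_eq]; rw [hget] at ha; simp [ha]
    rw [hx]
    exact congrArg _ (pvRun_spec cs (j + 1))
  · simp
termination_by cs.length - j
decreasing_by omega

-- outer-loop invariant: joining the collected pieces yields the mapped suffix
theorem pvLoop_spec (cs : List Char) (i : Nat) (pieces : List String) :
    ((pvLoop cs cs.length i pieces).map String.toList).flatten
      = (pieces.map String.toList).flatten ++ (cs.drop i).map pvF := by
  rw [pvLoop]
  split
  · rename_i hlt
    split
    · rename_i ha
      rw [pvLoop_spec cs (pvRun cs cs.length i)]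
      simp only [List.map_append, List.flatten_append, List.map_cons, List.map_nil,
        String.toList_ofList, List.flatten_cons, List.flatten_nil, List.append_nil,
        List.append_assoc]
      rw [pvRun_spec cs i]
    · rename_i ha
      rw [pvLoop_spec cs (i + 1)]
      have hdrop : cs.drop i = cs[i] :: cs.drop (i + 1) :=
        List.drop_eq_getElem_cons hlt
      have hget : cs.getD i ' ' = cs[i] := List.getD_eq_getElem cs ' ' hlt
      have hc : pvF cs[i] = cs[i] := by
        rw [pvF_eq]; rw [hget] at ha; simp [ha]
      rw [hdrop]
      simp only [List.map_append, List.flatten_append, List.map_cons, List.map_nil,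
        String.toList_ofList, List.flatten_cons, List.flatten_nil, List.append_nil,
        List.append_assoc, hget, hc]
      simp
  · rename_i hge
    have : cs.drop i = [] := List.drop_eq_nil_of_le (by omega)
    simp [this]
termination_by cs.length - i
decreasing_by
  all_goals first
    | (have := pvRun_gt cs cs.length i (by assumption) (by assumption); omega)
    | omega

-- ===== VERDICT (by name: the statement is the Claim_ definition above) =====
theorem makeConfidentialString_spec : Claim_equal_makeConfidentialString := by
  intro s _
  unfold Spec_makeConfidentialString makeConfidentialString makeConfidentialString_alt
  apply String.toList_inj.mp
  rw [PySem.List.foldl_append_singleton_eq_map, List.nil_append]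
  have h0 : ("" : String).toList = [] := rfl
  rw [PySem.Str.toList_join, h0, pvJoin_nil_flatten]
  have := pvLoop_spec s.toList 0 []
  simp only [List.map_nil, List.flatten_nil, List.nil_append, List.drop_zero] at this
  rw [this]
  simp [pvF]
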